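-- pv_equiv track=rewrite | github.com/YuneGit/Yuneify | modules/Note_Chords.py | midi_to_spn
-- ===== SOURCE A (Python) =====
-- NOTE_OFFSETS = {
--     'C': 0,
--     'C#': 1,
--     'Db': 1,
--     'D': 2,
--     'D#': 3,
--     'Eb': 3,
--     'E': 4,
--     'F': 5,
--     'F#': 6,
--     'Gb': 6,
--     'G': 7,
--     'G#': 8,
--     'Ab': 8,
--     'A': 9,
--     'A#': 10,
--     'Bb': 10,
--     'B': 11
-- }
--
-- def midi_to_spn(midi_number):
--     """
--     Convert a MIDI note number to Scientific Pitch Notation.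
--     """
--     octave = (midi_number // 12) - 1
--     note_number = midi_number % 12
--     # Prefer a note name with sharp notation when possible
--     for note, offset in NOTE_OFFSETS.items():
--         if offset == note_number and ("#" in note or len(note) == 1):
--             return f"{note}{octave}"
--     # Fallback: return the first match
--     for note, offset in NOTE_OFFSETS.items():
--         if offset == note_number:
--             return f"{note}{octave}"
--     return None
-- ===== SOURCE B (Python) =====
-- NAMES = {0: 'C', 1: 'C#', 2: 'D', 3: 'D#', 4: 'E', 5: 'F',
--          6: 'F#', 7: 'G', 8: 'G#', 9: 'A', 10: 'A#', 11: 'B'}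
--
--
-- def midi_to_spn(midi_number):
--     """
--     Convert a MIDI note number to Scientific Pitch Notation.
--     """
--     octave = (midi_number // 12) - 1
--     name = NAMES.get(midi_number % 12)
--     return f"{name}{octave}" if name is not None else None
-- ===== Notes on version B (the rewrite author's own statement) =====
-- stated objective: simpler
-- what changed: Replaces the two scanning loops over the note->offset dict and the sharp-preference branch with a single direct lookup in a precomputed pitch-class->name table that bakes the sharp preference in.
import Mathlib
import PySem

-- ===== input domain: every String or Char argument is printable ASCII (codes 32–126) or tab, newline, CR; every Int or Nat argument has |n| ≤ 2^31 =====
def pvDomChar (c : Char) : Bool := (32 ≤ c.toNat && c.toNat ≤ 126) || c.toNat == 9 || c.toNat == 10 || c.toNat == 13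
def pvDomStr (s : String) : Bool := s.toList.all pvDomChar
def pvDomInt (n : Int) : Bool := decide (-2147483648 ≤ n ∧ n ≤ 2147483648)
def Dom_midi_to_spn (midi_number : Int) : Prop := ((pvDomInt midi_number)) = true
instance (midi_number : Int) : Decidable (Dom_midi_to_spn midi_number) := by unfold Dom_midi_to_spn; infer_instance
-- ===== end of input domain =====

-- B replaces A's two scanning loops and sharp-preference branch with one direct
-- lookup in a precomputed pitch-class -> name table (objective: simpler).

-- ===== PORT A =====
def pvNoteOffsets : List (String × Int) :=
  [("C", 0), ("C#", 1), ("Db", 1), ("D", 2), ("D#", 3), ("Eb", 3), ("E", 4),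
   ("F", 5), ("F#", 6), ("Gb", 6), ("G", 7), ("G#", 8), ("Ab", 8), ("A", 9),
   ("A#", 10), ("Bb", 10), ("B", 11)]

-- first loop: prefer a name containing '#' or a single-letter name
def pvLoop1 (noteNumber octave : Int) : List (String × Int) → Option String
  | [] => none
  | (note, off) :: rest =>
    if off = noteNumber ∧ (PySem.Str.isIn "#" note = true ∨ PySem.Str.len note = 1) then
      some (note ++ PySem.Int.toStr octave)
    else pvLoop1 noteNumber octave rest

-- second loop: fallback, first match
def pvLoop2 (noteNumber octave : Int) : List (String × Int) → Option String
  | [] => none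
  | (note, off) :: rest =>
    if off = noteNumber then some (note ++ PySem.Int.toStr octave)
    else pvLoop2 noteNumber octave rest

def midi_to_spn (midi_number : Int) : Option String :=
  let octave := PySem.Int.floordiv midi_number 12 - 1
  let noteNumber := PySem.Int.mod midi_number 12
  match pvLoop1 noteNumber octave pvNoteOffsets with
  | some s => some s
  | none =>
    match pvLoop2 noteNumber octave pvNoteOffsets with
    | some s => some s
    | none => none

-- ===== PORT B =====
def pvNames : PySem.Dict Int String :=
  PySem.Dict.ofList [(0, "C"), (1, "C#"), (2, "D"), (3, "D#"), (4, "E"), (5, "F"),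
   (6, "F#"), (7, "G"), (8, "G#"), (9, "A"), (10, "A#"), (11, "B")]

def midi_to_spn_alt (midi_number : Int) : Option String :=
  let octave := PySem.Int.floordiv midi_number 12 - 1
  match PySem.Dict.get? pvNames (PySem.Int.mod midi_number 12) with
  | some name => some (name ++ PySem.Int.toStr octave)
  | none => none

-- ===== PRECONDITION & SPEC =====
def Spec_midi_to_spn (midi_number : Int) (out : Option String) : Prop := out = midi_to_spn_alt midi_number
instance (midi_number : Int) (out : Option String) : Decidable (Spec_midi_to_spn midi_number out) := by unfold Spec_midi_to_spn; infer_instance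

-- ===== CLAIM (what is proved, stated in full; the proofs are below) =====
def Claim_equal_midi_to_spn : Prop := ∀ (midi_number : Int), Dom_midi_to_spn midi_number → Spec_midi_to_spn midi_number (midi_to_spn midi_number)

-- ===== LEMMAS AND PROOFS =====
-- for each pitch class 0..11 the two lookups agree, with the octave abstract
theorem pv_agree (r : Int) (h0 : 0 ≤ r) (h12 : r < 12) (oct : Int) :
    (match pvLoop1 r oct pvNoteOffsets with
     | some s => some s
     | none =>
       match pvLoop2 r oct pvNoteOffsets with
       | some s => some s
       | none => none) =
    (match PySem.Dict.get? pvNames r with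
     | some name => some (name ++ PySem.Int.toStr oct)
     | none => none) := by
  interval_cases r <;>
    rfl

-- ===== VERDICT (by name: the statement is the Claim_ definition above) =====
theorem midi_to_spn_spec : Claim_equal_midi_to_spn := by
  intro m _
  show midi_to_spn m = midi_to_spn_alt m
  unfold midi_to_spn midi_to_spn_alt
  exact pv_agree _ (PySem.Int.mod_nonneg m (by norm_num))
    (PySem.Int.mod_lt m (by norm_num)) _
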